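-- pv_equiv track=rewrite | github.com/ykumthekar4929/Data_Mining | Quiz_2_B/Task_3/data_handler.py | pre_processor
-- ===== SOURCE A (Python) =====
-- def pre_processor(file):
-- 	indexes = []
-- 	data_raw = []
-- 	data = []
-- 	for index, line in enumerate(file):
-- 		if index != 0:
-- 			data_raw.append(line.rstrip().rsplit(','))
-- 		else:
-- 			indexes = line.rstrip().rsplit(',')
-- 	for x in range(0, len(indexes)):
-- 		index_list = [sample[x] for sample in data_raw]
-- 		data.append(index_list + [indexes[x]])
-- 	return data, indexes
-- ===== SOURCE B (Python) =====
-- def pre_processor(file):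
--     if file:
--         indexes = file[0].rstrip().rsplit(',')
--         rows = [line.rstrip().rsplit(',') for line in file[1:]]
--     else:
--         indexes = []
--         rows = []
--     data = [[] for _ in indexes]
--     for sample in rows:
--         for x, col in enumerate(data):
--             col.append(sample[x])
--     for x, col in enumerate(data):
--         col.append(indexes[x])
--     return data, indexes
-- ===== Notes on version B (the rewrite author's own statement) =====
-- stated objective: alternative
-- what changed: Replaces A's per-column loop that rescans the whole row list once per header field with slice-based parsing plus a single distributing row-major pass that appends each row's fields to their columns, then finishes each column with its header entry.
-- outside the precondition, e.g. on pre_processor(['a,b', 'x']): A raises IndexError, B raises IndexError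
import Mathlib
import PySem

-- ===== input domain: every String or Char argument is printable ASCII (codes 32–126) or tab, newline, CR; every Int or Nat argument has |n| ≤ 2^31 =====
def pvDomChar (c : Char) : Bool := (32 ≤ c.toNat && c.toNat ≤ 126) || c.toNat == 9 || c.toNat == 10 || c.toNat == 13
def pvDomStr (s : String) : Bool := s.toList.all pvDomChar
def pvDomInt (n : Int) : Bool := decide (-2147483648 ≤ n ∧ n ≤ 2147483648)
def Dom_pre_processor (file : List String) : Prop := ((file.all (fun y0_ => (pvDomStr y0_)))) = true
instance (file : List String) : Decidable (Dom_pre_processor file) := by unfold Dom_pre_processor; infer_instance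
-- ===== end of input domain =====

-- B replaces A's per-column rescans of all rows by one distributing pass over the rows
-- (each row's fields are appended to their columns once); return value only, no mutation.

-- split a CSV line the way both Pythons do: line.rstrip().rsplit(',')
def pvSplitLine (line : String) : List String :=
  (PySem.Str.split? (PySem.Str.rstrip line) ",").getD []

-- ===== PORT A =====
def pre_processor (file : List String) : List (List String) × List String :=
  -- first loop: for index, line in enumerate(file)
  let st := (PySem.List.enumerate file).foldl
    (fun (st : List String × List (List String)) p =>
      if p.1 ≠ 0 then (st.1, st.2 ++ [pvSplitLine p.2])
      else (pvSplitLine p.2, st.2)) ([], [])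
  let indexes := st.1
  let data_raw := st.2
  -- second loop: for x in range(0, len(indexes)); sample[x] is in range under Pre_
  let data := (PySem.List.pyRange 0 (indexes.length : Int) 1).foldl
    (fun data x =>
      data ++ [(data_raw.map (fun sample => PySem.List.pyGetD sample x "")) ++
               [PySem.List.pyGetD indexes x ""]]) []
  (data, indexes)

-- ===== PORT B =====
def pre_processor_alt (file : List String) : List (List String) × List String :=
  let pr : List String × List (List String) :=
    if file ≠ [] then
      (pvSplitLine (PySem.List.pyGetD file 0 ""),
       (PySem.List.slice file (some 1) none).map pvSplitLine)
    else ([], [])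
  let indexes := pr.1
  let rows := pr.2
  let data0 : List (List String) := indexes.map (fun _ => [])
  let data := rows.foldl
    (fun data sample =>
      (PySem.List.enumerate data).map (fun p => p.2 ++ [PySem.List.pyGetD sample p.1 ""]))
    data0
  ((PySem.List.enumerate data).map (fun p => p.2 ++ [PySem.List.pyGetD indexes p.1 ""]), indexes)

-- ===== PRECONDITION & SPEC =====
-- Pre_ excludes exactly the inputs where Python A raises IndexError (a data row that,
-- after rstrip/rsplit, has fewer fields than the header); B raises the same way there.
def Pre_pre_processor (file : List String) : Prop :=
  ∀ l ∈ file.drop 1, (pvSplitLine (file.headD "")).length ≤ (pvSplitLine l).length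
instance (file : List String) : Decidable (Pre_pre_processor file) := by
  unfold Pre_pre_processor; infer_instance
def pvWitness_pre_processor : List String := ["id,name", "1,ab", "2,cd "]

def Spec_pre_processor (file : List String) (out : List (List String) × List String) : Prop := out = pre_processor_alt file
instance (file : List String) (out : List (List String) × List String) : Decidable (Spec_pre_processor file out) := by unfold Spec_pre_processor; infer_instance

-- ===== CLAIM (what is proved, stated in full; the proofs are below) =====
def Claim_equal_pre_processor : Prop := ∀ (file : List String), Dom_pre_processor file → Pre_pre_processor file → Spec_pre_processor file (pre_processor file)

-- ===== LEMMAS AND PROOFS =====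

-- A's first loop over the tail (all indices ≥ 1) just appends the split rows.
theorem pvParseTail (t : List String) :
    ∀ (i : Int), 1 ≤ i → ∀ (acc : List String × List (List String)),
    (PySem.List.enumerate t i).foldl
      (fun (st : List String × List (List String)) p =>
        if p.1 ≠ 0 then (st.1, st.2 ++ [pvSplitLine p.2])
        else (pvSplitLine p.2, st.2)) acc
    = (acc.1, acc.2 ++ t.map pvSplitLine) := by
  induction t with
  | nil => intro i _ acc; simp [PySem.List.enumerate_nil]
  | cons h t ih =>
    intro i hi acc
    rw [PySem.List.enumerate_cons]
    simp only [List.foldl_cons]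
    have hne : i ≠ 0 := by omega
    rw [if_pos hne, ih (i + 1) (by omega)]
    simp [List.map_cons]

-- one distributing step over a map-of-range presentation of the columns
theorem pvStepMap (n : Nat) (g : Int → List String) (r : List String) :
    (PySem.List.enumerate ((PySem.List.pyRange 0 (n : Int) 1).map g)).map
      (fun p => p.2 ++ [PySem.List.pyGetD r p.1 ""])
    = (PySem.List.pyRange 0 (n : Int) 1).map (fun j => g j ++ [PySem.List.pyGetD r j ""]) := by
  rw [PySem.List.enumerate_eq_map_pyRange ((PySem.List.pyRange 0 (n : Int) 1).map g) ([] : List String)]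
  simp only [PySem.List.len]
  rw [List.length_map, PySem.List.length_pyRange_one]
  simp only [Int.sub_zero, Int.toNat_natCast, List.map_map]
  apply List.map_congr_left
  intro j hj
  have hmem := (PySem.List.mem_pyRange_one).1 hj
  simp only [Function.comp]
  rw [PySem.List.pyGetD_map_pyRange_of_nonneg g (n : Int) j ([] : List String) hmem.1 hmem.2]

-- B's row loop maintains: columns = range-map of (initial column ++ fields so far)
theorem pvFoldInv (n : Nat) (rows : List (List String)) :
    ∀ (g : Int → List String),
    rows.foldl
      (fun data sample =>
        (PySem.List.enumerate data).map (fun p => p.2 ++ [PySem.List.pyGetD sample p.1 ""]))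
      ((PySem.List.pyRange 0 (n : Int) 1).map g)
    = (PySem.List.pyRange 0 (n : Int) 1).map
        (fun j => g j ++ rows.map (fun s => PySem.List.pyGetD s j "")) := by
  induction rows with
  | nil => intro g; simp
  | cons r rs ih =>
    intro g
    simp only [List.foldl_cons]
    rw [pvStepMap n g r, ih (fun j => g j ++ [PySem.List.pyGetD r j ""])]
    apply List.map_congr_left
    intro j _
    simp [List.map_cons]

-- the empty initial columns of B, as a map over the range
theorem pvData0 (n : Nat) (indexes : List String) (h : indexes.length = n) :
    indexes.map (fun _ => ([] : List String))
      = (PySem.List.pyRange 0 (n : Int) 1).map (fun _ => ([] : List String)) := by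
  rw [List.map_const', List.map_const', PySem.List.length_pyRange_one]
  simp [h]

-- ===== VERDICT (by name: the statement is the Claim_ definition above) =====
theorem pre_processor_spec : Claim_equal_pre_processor := by
  intro file _ _
  unfold Spec_pre_processor pre_processor pre_processor_alt
  cases file with
  | nil =>
    simp [PySem.List.enumerate_nil, PySem.List.pyRange_one_eq_nil]
  | cons h t =>
    -- parsing: A's loop and B's slice/map produce the same header and rows
    rw [PySem.List.enumerate_cons]
    simp only [List.foldl_cons, if_neg (by decide : ¬ ((0 : Int) ≠ 0))]
    simp only [zero_add]
    rw [pvParseTail t 1 (by omega) (pvSplitLine h, [])]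
    simp only [PySem.List.slice_from_one, List.tail_cons, ne_eq, reduceCtorEq,
      not_false_eq_true, if_pos, PySem.List.pyGetD_zero_cons, List.nil_append]
    -- second phase
    rw [PySem.List.foldl_append_singleton_eq_map]
    rw [pvData0 (pvSplitLine h).length (pvSplitLine h) rfl]
    rw [pvFoldInv (pvSplitLine h).length (t.map pvSplitLine) (fun _ => [])]
    rw [pvStepMap (pvSplitLine h).length
      (fun j => [] ++ (t.map pvSplitLine).map (fun s => PySem.List.pyGetD s j "")) (pvSplitLine h)]
    simp [List.map_map]
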